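-- pv_equiv track=rewrite | github.com/mateuszmacheta/codewars-python | all-start-challenge-19.py | slogan_maker
-- ===== SOURCE A (Python) =====
-- def slogan_maker(arr):
--     arr = make_unique(arr)
--     if len(arr) <= 1:
--         return list(arr)
--     slogans = []
--     for i in range(0,len(arr)):
--         row = []
--         row.append(arr[i])
--         row += arr[:i] + arr[i+1:]
--         slogans.append(" ".join(row))
--         for j in range(1,len(arr)-1):
--             row[j], row[j+1] = row[j+1], row[j]
--             slogans.append(" ".join(row))
--     return slogans
--
-- def make_unique(arr: list):
--     result = []
--     for e in arr:
--         if e not in result: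
--             result.append(e)
--     return result
-- ===== SOURCE B (Python) =====
-- def slogan_maker(arr):
--     words = list(dict.fromkeys(arr))
--     if len(words) <= 1:
--         return words
--     n = len(words)
--     return [
--         " ".join([w] + s[1:t + 1] + s[:1] + s[t + 1:])
--         for i, w in enumerate(words)
--         for s in [words[:i] + words[i + 1:]]
--         for t in range(n - 1)
--     ]
-- ===== Notes on version B (the rewrite author's own statement) =====
-- stated objective: simpler
-- what changed: B computes each slogan directly by a closed slice formula s[1:t+1] + s[:1] + s[t+1:] inside a single comprehension instead of A's stateful chain of in-place adjacent swaps carried across inner iterations, and dedups with dict.fromkeys instead of a quadratic membership loop.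
import Mathlib
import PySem

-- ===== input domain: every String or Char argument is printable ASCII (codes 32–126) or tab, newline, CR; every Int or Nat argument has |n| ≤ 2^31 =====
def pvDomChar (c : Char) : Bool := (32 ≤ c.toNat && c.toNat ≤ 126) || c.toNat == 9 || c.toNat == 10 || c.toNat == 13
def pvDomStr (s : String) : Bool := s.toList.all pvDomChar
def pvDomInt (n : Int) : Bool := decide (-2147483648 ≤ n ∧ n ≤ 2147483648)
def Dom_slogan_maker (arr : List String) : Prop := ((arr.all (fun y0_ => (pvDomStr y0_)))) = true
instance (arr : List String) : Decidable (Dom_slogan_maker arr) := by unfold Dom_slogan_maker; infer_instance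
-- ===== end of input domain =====

-- B replaces A's in-place swap chain (a mutated row carried across inner iterations) by a
-- direct slice formula for each slogan and dedups via dict.fromkeys: objective 'simpler'.

-- ===== PORT A =====
def make_unique (arr : List String) : List String :=
  arr.foldl (fun result e => if result.contains e then result else result ++ [e]) []

-- inner-loop body: row[j], row[j+1] = row[j+1], row[j]; slogans.append(" ".join(row))
def swapBody (st : List String × List String) (j : Int) : List String × List String :=
  let hi := PySem.List.pyGetD st.1 (j + 1) ""
  let lo := PySem.List.pyGetD st.1 j ""
  let row2 := PySem.List.pySetD (PySem.List.pySetD st.1 j hi) (j + 1) lo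
  (row2, st.2 ++ [PySem.Str.join " " row2])

-- outer-loop body over i (indices produced by range are in range)
def outerBody (u : List String) (slogans : List String) (i : Int) : List String :=
  let row : List String :=
    [PySem.List.pyGetD u i ""] ++
      (PySem.List.slice u none (some i) ++ PySem.List.slice u (some (i + 1)) none)
  let slogans2 := slogans ++ [PySem.Str.join " " row]
  ((PySem.List.pyRange 1 ((u.length : Int) - 1) 1).foldl swapBody (row, slogans2)).2

def slogan_maker (arr : List String) : List String :=
  let arr2 := make_unique arr
  if arr2.length ≤ 1 then arr2
  else (PySem.List.pyRange 0 (arr2.length : Int) 1).foldl (outerBody arr2) []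

-- ===== PORT B =====
def slogan_maker_alt (arr : List String) : List String :=
  let words := PySem.List.dedup arr
  if words.length ≤ 1 then words
  else
    (PySem.List.enumerate words 0).flatMap (fun iw =>
      let s := PySem.List.slice words none (some iw.1) ++
               PySem.List.slice words (some (iw.1 + 1)) none
      (PySem.List.pyRange 0 ((words.length : Int) - 1) 1).map (fun t =>
        PySem.Str.join " "
          ([iw.2] ++ PySem.List.slice s (some 1) (some (t + 1)) ++
            PySem.List.slice s none (some 1) ++ PySem.List.slice s (some (t + 1)) none)))

-- ===== PRECONDITION & SPEC =====
def Spec_slogan_maker (arr : List String) (out : List String) : Prop := out = slogan_maker_alt arr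
instance (arr : List String) (out : List String) : Decidable (Spec_slogan_maker arr out) := by unfold Spec_slogan_maker; infer_instance

-- ===== CLAIM (what is proved, stated in full; the proofs are below) =====
def Claim_equal_slogan_maker : Prop := ∀ (arr : List String), Dom_slogan_maker arr → Spec_slogan_maker arr (slogan_maker arr)

-- ===== LEMMAS AND PROOFS =====

-- the row after t adjacent swaps: arr[i] :: (s'.take t ++ s0 :: s'.drop t), where s = s0 :: s'
def rowAt (a s0 : String) (s' : List String) (t : Nat) : List String :=
  a :: (s'.take t ++ s0 :: s'.drop t)

-- the block of slogans produced for one outer index k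
def perOut (u : List String) (k : Nat) : List String :=
  (List.range (u.length - 1)).map (fun t =>
    PySem.Str.join " " (u.getD k "" ::
      (((u.take k ++ u.drop (k + 1)).drop 1).take t ++
        (u.take k ++ u.drop (k + 1)).take 1 ++ (u.take k ++ u.drop (k + 1)).drop (t + 1))))

lemma pv_getD_mid {α : Type} (p : List α) (x : α) (q : List α) (d : α) :
    (p ++ x :: q).getD p.length d = x := by
  induction p with
  | nil => rfl
  | cons a p ih =>
    simp only [List.cons_append, List.length_cons, List.getD_cons_succ]
    exact ih

lemma pv_set_swap {α : Type} (p : List α) (x y : α) (q : List α) :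
    ((p ++ x :: y :: q).set p.length y).set (p.length + 1) x = p ++ y :: x :: q := by
  induction p with
  | nil => rfl
  | cons a p ih =>
    simp only [List.cons_append, List.length_cons, List.set_cons_succ]
    rw [ih]

lemma swap_step (a s0 : String) (s' : List String) (t : Nat) (ht : t < s'.length)
    (acc : List String) :
    swapBody (rowAt a s0 s' t, acc) ((t : Int) + 1)
      = (rowAt a s0 s' (t + 1), acc ++ [PySem.Str.join " " (rowAt a s0 s' (t + 1))]) := by
  have hdrop : s'.drop t = s'[t] :: s'.drop (t + 1) := List.drop_eq_getElem_cons ht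
  have htake : s'.take (t + 1) = s'.take t ++ [s'[t]] := by
    rw [List.take_add_one]; simp [List.getElem?_eq_getElem ht]
  have hrow : rowAt a s0 s' t = (a :: s'.take t) ++ s0 :: s'[t] :: s'.drop (t + 1) := by
    unfold rowAt; rw [hdrop]; simp
  have hlen : (a :: s'.take t).length = t + 1 := by
    simp only [List.length_cons, List.length_take]; omega
  have hlen2 : ((a :: s'.take t) ++ [s0]).length = t + 2 := by
    simp only [List.length_append, List.length_cons, List.length_take, List.length_nil]; omega
  have h1 : (t : Int) + 1 = ((t + 1 : Nat) : Int) := by push_cast; ring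
  have h2 : (t : Int) + 1 + 1 = ((t + 2 : Nat) : Int) := by push_cast; ring
  have hget2 : PySem.List.pyGetD (rowAt a s0 s' t) ((t : Int) + 1 + 1) "" = s'[t] := by
    rw [h2, PySem.List.pyGetD_natCast, hrow,
        show (a :: s'.take t) ++ s0 :: s'[t] :: s'.drop (t + 1)
           = ((a :: s'.take t) ++ [s0]) ++ s'[t] :: s'.drop (t + 1) from by simp,
        show t + 2 = ((a :: s'.take t) ++ [s0]).length from hlen2.symm]
    exact pv_getD_mid _ _ _ _
  have hget1 : PySem.List.pyGetD (rowAt a s0 s' t) ((t : Int) + 1) "" = s0 := by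
    rw [h1, PySem.List.pyGetD_natCast, hrow,
        show t + 1 = (a :: s'.take t).length from hlen.symm]
    exact pv_getD_mid _ _ _ _
  have hset : PySem.List.pySetD (PySem.List.pySetD (rowAt a s0 s' t) ((t : Int) + 1) s'[t])
      ((t : Int) + 1 + 1) s0 = rowAt a s0 s' (t + 1) := by
    rw [h2, h1, PySem.List.pySetD_natCast, PySem.List.pySetD_natCast, hrow]
    have hs := pv_set_swap (a :: s'.take t) s0 s'[t] (s'.drop (t + 1))
    rw [hlen] at hs
    rw [show t + 2 = t + 1 + 1 from rfl, hs]
    unfold rowAt; rw [htake]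
    simp only [List.append_assoc, List.cons_append, List.nil_append]
  simp only [swapBody, hget2, hget1, hset]

lemma inner_fold (a s0 : String) (s' : List String) :
    ∀ (m t : Nat), t + m ≤ s'.length → ∀ (acc : List String),
    (PySem.List.pyRange ((t : Int) + 1) ((t : Int) + 1 + m) 1).foldl swapBody (rowAt a s0 s' t, acc)
      = (rowAt a s0 s' (t + m),
         acc ++ (List.range m).map (fun k => PySem.Str.join " " (rowAt a s0 s' (t + 1 + k)))) := by
  intro m
  induction m with
  | zero =>
    intro t h acc
    rw [PySem.List.pyRange_one_eq_nil (by omega)]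
    simp
  | succ m ih =>
    intro t h acc
    rw [PySem.List.pyRange_one_cons (by omega), List.foldl_cons,
        swap_step a s0 s' t (by omega) acc]
    have hc : (t : Int) + 1 + 1 = ((t + 1 : Nat) : Int) + 1 := by push_cast; ring
    have hc2 : (t : Int) + 1 + ((m + 1 : Nat) : Int) = ((t + 1 : Nat) : Int) + 1 + (m : Nat) := by
      push_cast; ring
    rw [hc, hc2, ih (t + 1) (by omega)]
    rw [show t + 1 + m = t + (m + 1) from by omega]
    rw [List.range_succ_eq_map, List.map_cons, List.map_map]
    simp only [Nat.add_zero, List.append_assoc, List.singleton_append]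
    congr 2
    congr 1
    apply List.map_congr_left
    intro k _
    simp only [Function.comp]
    congr 2
    omega

-- one outer iteration produces exactly perOut u k
lemma outer_step (u : List String) (hn : 2 ≤ u.length) (k : Nat) (hk : k < u.length)
    (acc : List String) :
    outerBody u acc (k : Int) = acc ++ perOut u k := by
  have hslen : (u.take k ++ u.drop (k + 1)).length = u.length - 1 := by
    simp only [List.length_append, List.length_take, List.length_drop]; omega
  obtain ⟨s0, s', hs⟩ : ∃ s0 s', u.take k ++ u.drop (k + 1) = s0 :: s' := by
    cases h : u.take k ++ u.drop (k + 1) with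
    | nil => rw [h] at hslen; simp at hslen; omega
    | cons x xs => exact ⟨x, xs, rfl⟩
  have hs'len : s'.length = u.length - 2 := by
    rw [hs] at hslen; simp at hslen; omega
  unfold outerBody
  rw [show ((k : Int) + 1) = ((k + 1 : Nat) : Int) from by push_cast; ring,
      PySem.List.slice_to_natCast, PySem.List.slice_from_natCast, PySem.List.pyGetD_natCast,
      hs]
  simp only [List.singleton_append]
  rw [show u.getD k "" :: s0 :: s' = rowAt (u.getD k "") s0 s' 0 from rfl]
  have hif := inner_fold (u.getD k "") s0 s' s'.length 0 (by omega)
    (acc ++ [PySem.Str.join " " (rowAt (u.getD k "") s0 s' 0)])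
  simp only [Nat.cast_zero, zero_add] at hif
  rw [show ((u.length : Int) - 1) = 1 + ((s'.length : Nat) : Int) from by omega,
      hif]
  unfold perOut
  rw [hs, show u.length - 1 = s'.length + 1 from by omega, List.range_succ_eq_map, List.map_cons,
      List.map_map]
  simp only [rowAt, List.drop_succ_cons, List.drop_zero, List.take_succ_cons, List.take_zero,
    List.append_assoc, List.nil_append, List.cons_append, Nat.zero_add]
  congr 2
  apply List.map_congr_left
  intro t _
  simp only [Function.comp_apply]
  rw [Nat.add_comm 1 t]

lemma enumerate_eq_map (u : List String) :
    ∀ s : Int, PySem.List.enumerate u s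
      = (List.range u.length).map (fun (k : Nat) => ((s + (k : Int) : Int), u.getD k "")) := by
  induction u with
  | nil => intro s; simp [PySem.List.enumerate]
  | cons x xs ih =>
    intro s
    rw [PySem.List.enumerate_cons, ih (s + 1), List.length_cons, List.range_succ_eq_map,
        List.map_cons, List.map_map]
    simp only [Nat.cast_zero, add_zero, List.getD_cons_zero]
    congr 1
    apply List.map_congr_left
    intro k _
    simp only [Function.comp, List.getD_cons_succ, Nat.succ_eq_add_one]
    congr 1
    push_cast
    ring

lemma A_flat (arr : List String) (hn : ¬ (make_unique arr).length ≤ 1) :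
    slogan_maker arr = (List.range (make_unique arr).length).flatMap (perOut (make_unique arr)) := by
  rw [slogan_maker]
  simp only [hn, if_false]
  rw [PySem.List.pyRange_zero_nat, List.foldl_map]
  rw [PySem.List.foldl_congr_mem _ _ (fun acc k => acc ++ perOut (make_unique arr) k) _
    (fun acc k hk => outer_step _ (by omega) k (List.mem_range.mp hk) acc)]
  exact PySem.List.foldl_append_eq_flatMap _ _ []

lemma B_flat (arr : List String) (hn : ¬ (PySem.List.dedup arr).length ≤ 1) :
    slogan_maker_alt arr
      = (List.range (PySem.List.dedup arr).length).flatMap (perOut (PySem.List.dedup arr)) := by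
  have hlen : 2 ≤ (PySem.List.dedup arr).length := by omega
  simp only [slogan_maker_alt]
  rw [if_neg hn, enumerate_eq_map, List.flatMap_map, List.flatMap_def, List.flatMap_def]
  congr 1
  apply List.map_congr_left
  intro k hk
  have hk' : k < (PySem.List.dedup arr).length := List.mem_range.mp hk
  simp only [zero_add]
  rw [show ((k : Int) + 1) = ((k + 1 : Nat) : Int) from by push_cast; ring,
      PySem.List.slice_to_natCast, PySem.List.slice_from_natCast,
      show (((PySem.List.dedup arr).length : Int) - 1)
          = (((PySem.List.dedup arr).length - 1 : Nat) : Int) from by omega,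
      PySem.List.pyRange_zero_nat, List.map_map]
  unfold perOut
  apply List.map_congr_left
  intro t _
  simp only [Function.comp_apply]
  rw [show ((t : Int) + 1) = ((t + 1 : Nat) : Int) from by omega,
      show (1 : Int) = ((1 : Nat) : Int) from by norm_num,
      PySem.List.slice_natCast, PySem.List.slice_to_natCast, PySem.List.slice_from_natCast]
  simp only [Nat.add_sub_cancel, List.cons_append, List.append_assoc, List.nil_append]

lemma unique_eq_dedup (arr : List String) : make_unique arr = PySem.List.dedup arr := by
  rw [PySem.List.dedup_eq_ofList, PySem.Set.ofList_eq_foldl]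
  rfl

-- ===== VERDICT (by name: the statement is the Claim_ definition above) =====
theorem slogan_maker_spec : Claim_equal_slogan_maker := by
  intro arr _
  unfold Spec_slogan_maker
  by_cases h : (make_unique arr).length ≤ 1
  · rw [slogan_maker, slogan_maker_alt]
    simp only [← unique_eq_dedup, h, if_true]
  · rw [A_flat arr h, B_flat arr (by rw [← unique_eq_dedup]; exact h), unique_eq_dedup]
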